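-- pv_equiv track=rewrite | github.com/DinoBektesevic/pyconf | src/cfx/display.py | fmt_text_row
-- ===== SOURCE A (Python) =====
-- def fmt_text_row(wrapped_cells, widths):
--     r"""Format a single row into a fixed-width string.
--
--     A single row is an iterable. Each element of a row represents unit of
--     content that is separated from neighboring content by a ``" | "``.
--     The content itself is an iterable such that it spans multiple text-rows,
--     for example:
--
--         | content | content |
--         |         | content |
--
--
--     Parameters
--     ----------
--     wrapped_cells : `list[list[str]]`
--         One list-of-lines per column, as returned by `textwrap_row`.
--     widths : `list[int]`
--         Actual column widths (used for left-justifying each line).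
--
--     Returns
--     -------
--     textrow : `str`
--         One or more lines joined by ``"\\n"``.
--     """
--     n = max(len(c) for c in wrapped_cells)
--     out = []
--     for i in range(n):
--         parts = [
--             f"{wrapped_cells[col][i] if i < len(wrapped_cells[col]) else '':<{widths[col]}}"  # noqa: E501
--             for col in range(len(widths))
--         ]
--         out.append(" | ".join(parts))
--     return "\n".join(out)
-- ===== SOURCE B (Python) =====
-- def fmt_text_row(wrapped_cells, widths):
--     """Render each column as a fixed-width block of lines, then horizontally
--     concatenate the blocks with " | " by a left fold of zips."""
--     n = max(len(c) for c in wrapped_cells)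
--     blocks = [
--         [(cell[i] if i < len(cell) else "").ljust(w) for i in range(n)]
--         for cell, w in ((wrapped_cells[col], w) for col, w in enumerate(widths))
--     ]
--     if not blocks:
--         return "\n".join([""] * n)
--     merged = blocks[0]
--     for blk in blocks[1:]:
--         merged = [a + " | " + b for a, b in zip(merged, blk)]
--     return "\n".join(merged)
-- ===== Notes on version B (the rewrite author's own statement) =====
-- stated objective: alternative
-- what changed: B renders each column independently as a fixed-width block of n lines and then horizontally concatenates the blocks by a left fold of pairwise zips with ' | ', instead of A's row-major double loop that assembles each output line by indexing every column at row i.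
-- outside the precondition, e.g. on fmt_text_row([[]], [1, 2]): A returns '', B raises IndexError; on fmt_text_row([[]], [-1]): A returns '', B returns ''
import Mathlib
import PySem

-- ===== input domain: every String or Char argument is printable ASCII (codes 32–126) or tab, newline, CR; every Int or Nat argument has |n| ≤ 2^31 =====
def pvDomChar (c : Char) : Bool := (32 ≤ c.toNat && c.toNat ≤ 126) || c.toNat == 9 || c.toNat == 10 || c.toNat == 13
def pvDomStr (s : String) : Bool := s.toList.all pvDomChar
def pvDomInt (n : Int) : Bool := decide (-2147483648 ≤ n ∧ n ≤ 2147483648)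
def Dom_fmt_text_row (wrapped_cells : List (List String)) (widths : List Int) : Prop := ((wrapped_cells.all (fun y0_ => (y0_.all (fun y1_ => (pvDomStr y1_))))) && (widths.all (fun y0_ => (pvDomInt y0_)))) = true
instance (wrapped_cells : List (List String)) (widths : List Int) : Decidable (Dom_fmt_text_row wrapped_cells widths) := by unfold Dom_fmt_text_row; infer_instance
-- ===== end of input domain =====

-- B renders each column as an independent fixed-width block of lines and horizontally
-- concatenates the blocks by a left fold of pairwise zips; objective: alternative algorithm.

-- ===== PORT A =====
-- f"{s:<{w}}" / s.ljust(w): exact for 0 ≤ w (Pre_ guarantees; Python A raises ValueError on a negative width).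
def pyLjust (s : String) (w : Int) : String :=
  String.ofList (s.toList ++ List.replicate (w.toNat - s.toList.length) ' ')

def fmt_text_row (wrapped_cells : List (List String)) (widths : List Int) : String :=
  -- n = max(len(c) for c in wrapped_cells): Python max raises on [], excluded by Pre_
  let n : Int := (PySem.List.max? (wrapped_cells.map (fun c => (c.length : Int))) (fun x => x)).getD 0
  let out : List String := (PySem.List.pyRange 0 n 1).map (fun i =>
    PySem.Str.join " | " ((PySem.List.pyRange 0 (widths.length : Int) 1).map (fun col =>
      let cell := PySem.List.pyGetD wrapped_cells col []   -- wrapped_cells[col]: in range under Pre_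
      let s := if i < (cell.length : Int) then PySem.List.pyGetD cell i "" else ""
      pyLjust s (PySem.List.pyGetD widths col 0))))
  PySem.Str.join "\n" out

-- ===== PORT B =====
def fmt_text_row_alt (wrapped_cells : List (List String)) (widths : List Int) : String :=
  let n : Int := (PySem.List.max? (wrapped_cells.map (fun c => (c.length : Int))) (fun x => x)).getD 0
  -- one fixed-width block of n lines per column (enumerate(widths))
  let blocks : List (List String) := (PySem.List.enumerate widths).map (fun cw =>
    let cell := PySem.List.pyGetD wrapped_cells cw.1 []   -- wrapped_cells[col]: in range under Pre_
    (PySem.List.pyRange 0 n 1).map (fun i =>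
      pyLjust (if i < (cell.length : Int) then PySem.List.pyGetD cell i "" else "") cw.2))
  match blocks with
  | [] => PySem.Str.join "\n" (List.replicate n.toNat "")
  | b :: bs =>
    PySem.Str.join "\n"
      (bs.foldl (fun L R => List.zipWith (fun a b => a ++ " | " ++ b) L R) b)

-- ===== PRECONDITION & SPEC =====
-- Pre_ excludes the inputs where Python A raises: empty wrapped_cells (ValueError from max),
-- widths longer than wrapped_cells (IndexError) and a negative width (ValueError from the
-- f-string width spec) — slightly wider than the crashes: when every column is empty the
-- offending index/format is never reached and A returns the empty string there.
def Pre_fmt_text_row (wrapped_cells : List (List String)) (widths : List Int) : Prop :=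
  wrapped_cells ≠ [] ∧ widths.length ≤ wrapped_cells.length ∧ ∀ w ∈ widths, 0 ≤ w
instance (wrapped_cells : List (List String)) (widths : List Int) : Decidable (Pre_fmt_text_row wrapped_cells widths) := by unfold Pre_fmt_text_row; infer_instance

def pvWitness_fmt_text_row : List (List String) × List Int := ([["a", "bb"], ["ccc"]], [4, 5])

def Spec_fmt_text_row (wrapped_cells : List (List String)) (widths : List Int) (out : String) : Prop := out = fmt_text_row_alt wrapped_cells widths
instance (wrapped_cells : List (List String)) (widths : List Int) (out : String) : Decidable (Spec_fmt_text_row wrapped_cells widths out) := by unfold Spec_fmt_text_row; infer_instance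

-- ===== CLAIM =====
def Claim_equal_fmt_text_row : Prop := ∀ (wrapped_cells : List (List String)) (widths : List Int), Dom_fmt_text_row wrapped_cells widths → Pre_fmt_text_row wrapped_cells widths → Spec_fmt_text_row wrapped_cells widths (fmt_text_row wrapped_cells widths)

-- ===== LEMMAS AND PROOFS =====

-- a prefix distributes out of the per-line append fold
theorem foldl_sep_shift (sep p x : String) (t : List String) :
    t.foldl (fun a s => a ++ sep ++ s) (p ++ x) = p ++ t.foldl (fun a s => a ++ sep ++ s) x := by
  induction t generalizing x with
  | nil => rfl
  | cons y t ih =>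
    rw [List.foldl_cons, List.foldl_cons,
      show (p ++ x) ++ sep ++ y = p ++ (x ++ sep ++ y) from by simp [String.append_assoc], ih]

-- " | ".join(x :: xs) is the left fold of appends B's merge performs per line.
theorem join_cons_foldl (sep x : String) (xs : List String) :
    PySem.Str.join sep (x :: xs) = xs.foldl (fun a s => a ++ sep ++ s) x := by
  induction xs generalizing x with
  | nil => simp [PySem.Str.join, PySem.Chars.join_singleton]
  | cons y t ih =>
    have hstep : PySem.Str.join sep (x :: y :: t) = (x ++ sep) ++ PySem.Str.join sep (y :: t) := by
      simp [PySem.Str.join, PySem.Chars.join_cons_cons, String.ofList_append, String.append_assoc]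
    rw [hstep, ih, List.foldl_cons, ← foldl_sep_shift]

theorem zipWith_getD (f : String → String → String) (b c : List String) (i N : Nat)
    (hb : b.length = N) (hc : c.length = N) (hi : i < N) :
    (List.zipWith f b c).getD i "" = f (b.getD i "") (c.getD i "") := by
  have h : i < (List.zipWith f b c).length := by simp [hb, hc, hi]
  rw [List.getD_eq_getElem _ "" h, List.getElem_zipWith,
    List.getD_eq_getElem b "" (hb ▸ hi), List.getD_eq_getElem c "" (hc ▸ hi)]

-- the horizontal-concatenation fold, characterised index-wise
theorem merge_blocks (N : Nat) (b : List String) (bs : List (List String))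
    (hb : b.length = N) (h : ∀ c ∈ bs, c.length = N) :
    bs.foldl (fun L R => List.zipWith (fun a s => a ++ " | " ++ s) L R) b
      = (List.range N).map (fun i => PySem.Str.join " | "
          (b.getD i "" :: bs.map (fun c => c.getD i ""))) := by
  induction bs generalizing b with
  | nil =>
    apply List.ext_getElem
    · simp [hb]
    · intro i h1 h2
      simp only [List.getElem_map, List.getElem_range]
      rw [join_cons_foldl]
      have hib : i < b.length := by simpa using h1
      exact (List.getD_eq_getElem b "" hib).symm
  | cons c bs ih =>
    have hc : c.length = N := h c (by simp)
    have hzl : (List.zipWith (fun a s => a ++ " | " ++ s) b c).length = N := by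
      simp [hb, hc]
    rw [List.foldl_cons, ih _ hzl (fun d hd => h d (by simp [hd]))]
    apply List.map_congr_left
    intro i hi
    have hiN : i < N := List.mem_range.1 hi
    rw [zipWith_getD _ b c i N hb hc hiN, join_cons_foldl, join_cons_foldl]
    simp

-- length of a pyRange-indexed block
theorem pyRange_map_length {α : Type} (f : Int → α) (N : Nat) :
    ((PySem.List.pyRange 0 (N : Int) 1).map f).length = N := by
  rw [PySem.List.pyRange_zero_natCast N]; simp

-- entry i of a pyRange-indexed block
theorem pyRange_map_getD (f : Int → String) (N i : Nat) (hi : i < N) :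
    ((PySem.List.pyRange 0 (N : Int) 1).map f).getD i "" = f (i : Int) := by
  rw [PySem.List.pyRange_zero_natCast N, List.map_map]
  rw [List.getD_eq_getElem _ "" (by simpa using hi)]
  simp

-- the column blocks, merged by the fold, give exactly A's row-major lines
theorem cols_merge (F : Int → Int → String) (L N : Nat) (b : List String)
    (bs : List (List String))
    (hbl : (PySem.List.pyRange 0 (L : Int) 1).map
        (fun j => (PySem.List.pyRange 0 (N : Int) 1).map (fun i => F i j)) = b :: bs) :
    bs.foldl (fun Lx R => List.zipWith (fun a s => a ++ " | " ++ s) Lx R) b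
      = (PySem.List.pyRange 0 (N : Int) 1).map (fun i => PySem.Str.join " | "
          ((PySem.List.pyRange 0 (L : Int) 1).map (fun col => F i col))) := by
  have hlenall : ∀ c ∈ b :: bs, c.length = N := by
    rw [← hbl]
    intro c hc
    obtain ⟨j, _, rfl⟩ := List.mem_map.1 hc
    exact pyRange_map_length _ N
  rw [merge_blocks N b bs (hlenall b (by simp)) (fun c hc => hlenall c (by simp [hc]))]
  rw [PySem.List.pyRange_zero_natCast N, List.map_map]
  simp only [Function.comp_def]
  apply List.map_congr_left
  intro i hi
  have hiN : i < N := List.mem_range.1 hi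
  have hcons : (b.getD i "" :: bs.map (fun c => c.getD i ""))
      = (b :: bs).map (fun c => c.getD i "") := rfl
  rw [hcons, ← hbl, List.map_map]
  simp only [Function.comp_def]
  refine congrArg (PySem.Str.join " | ") (List.map_congr_left ?_)
  intro j _
  exact pyRange_map_getD _ N i hiN

-- ===== VERDICT =====
theorem fmt_text_row_spec : Claim_equal_fmt_text_row := by
  intro wc ws _ hpre
  obtain ⟨hne, hlen, _⟩ := hpre
  unfold Spec_fmt_text_row fmt_text_row fmt_text_row_alt
  cases hM : PySem.List.max? (wc.map (fun c => (c.length : Int))) (fun x => x) with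
  | none =>
    exact absurd (by simpa using (PySem.List.max?_eq_none_iff _ _).1 hM) hne
  | some m =>
    have hm0 : 0 ≤ m := by
      obtain ⟨c, _, rfl⟩ := List.mem_map.1 (PySem.List.max?_mem hM)
      positivity
    obtain ⟨N, rfl⟩ : ∃ N : ℕ, m = (N : Int) := ⟨m.toNat, (Int.toNat_of_nonneg hm0).symm⟩
    simp only [Option.getD_some, Int.toNat_natCast]
    rw [PySem.List.enumerate_eq_map_pyRange ws 0]
    cases hws : ws with
    | nil =>
      simp [PySem.List.pyRange_zero_natCast N, List.map_map, PySem.Str.join,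
        PySem.Chars.join, Function.comp_def, List.intercalate, List.map_const']
    | cons w ws' =>
      rw [← hws]
      have hwsne : ws ≠ [] := by simp [hws]
      have hL : 0 < ws.length := List.length_pos_of_ne_nil hwsne
      simp only [List.map_map, Function.comp_def, PySem.List.len_eq]
      cases hbl : (PySem.List.pyRange 0 (ws.length : Int) 1).map
          (fun j => (PySem.List.pyRange 0 (N : Int) 1).map (fun i =>
            pyLjust (if i < ((PySem.List.pyGetD wc j []).length : Int) then
                PySem.List.pyGetD (PySem.List.pyGetD wc j []) i "" else "")
              (PySem.List.pyGetD ws j 0))) with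
      | nil =>
        exfalso
        have h0 := congrArg List.length hbl
        rw [pyRange_map_length] at h0
        simp only [List.length_nil] at h0
        omega
      | cons b bs =>
        dsimp only
        rw [cols_merge (fun i col => pyLjust (if i < ((PySem.List.pyGetD wc col []).length : Int) then
              PySem.List.pyGetD (PySem.List.pyGetD wc col []) i "" else "")
            (PySem.List.pyGetD ws col 0)) ws.length N b bs hbl]
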